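-- pv_equiv track=rewrite | github.com/posl/comment_recommendation | script/mod_gen/2_time/en/238_C/3.py | solve
-- ===== SOURCE A (Python) =====
-- def solve(n):
--     if n <= 9:
--         return n * (n + 1) // 2
--     else:
--         d = len(str(n))
--         ans = 0
--         for i in range(1, d):
--             ans += i * 9 * (10 ** (i - 1))
--         ans += d * (n - (10 ** (d - 1)) + 1)
--         return ans
-- ===== SOURCE B (Python) =====
-- def solve(n):
--     if n <= 9:
--         return n * (n + 1) // 2
--     else:
--         d = len(str(n))
--         return (n + 1) * d - (10 ** d - 1) // 9
-- ===== Notes on version B (the rewrite author's own statement) =====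
-- stated objective: simpler
-- what changed: The per-digit-length accumulation loop and the trailing additive term are replaced by the single closed-form expression (n+1)*d - (10**d - 1)//9.
import Mathlib
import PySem

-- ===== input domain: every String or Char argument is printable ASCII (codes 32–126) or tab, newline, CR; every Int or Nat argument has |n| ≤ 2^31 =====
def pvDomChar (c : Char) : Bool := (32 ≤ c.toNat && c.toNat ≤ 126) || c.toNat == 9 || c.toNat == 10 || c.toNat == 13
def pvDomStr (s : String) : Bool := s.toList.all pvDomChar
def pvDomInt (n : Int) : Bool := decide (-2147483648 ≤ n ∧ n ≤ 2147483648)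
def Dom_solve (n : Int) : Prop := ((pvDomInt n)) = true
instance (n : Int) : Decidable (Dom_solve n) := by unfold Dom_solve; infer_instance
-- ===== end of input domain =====

-- B replaces A's per-digit-length accumulation loop by the closed form (n+1)*d - (10^d-1)//9 (objective: simpler).

-- ===== PORT A =====
def solve (n : Int) : Int :=
  if n ≤ 9 then PySem.Int.floordiv (n * (n + 1)) 2
  else
    let d : Int := PySem.Str.len (PySem.Int.toStr n)
    let ans : Int := (PySem.List.pyRange 1 d 1).foldl
      (fun ans i => ans + i * 9 * 10 ^ (i - 1).toNat) 0
    ans + d * (n - 10 ^ (d - 1).toNat + 1)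

-- ===== PORT B =====
def solve_alt (n : Int) : Int :=
  if n ≤ 9 then PySem.Int.floordiv (n * (n + 1)) 2
  else
    let d : Int := PySem.Str.len (PySem.Int.toStr n)
    (n + 1) * d - PySem.Int.floordiv (10 ^ d.toNat - 1) 9

-- ===== PRECONDITION & SPEC =====
def Spec_solve (n : Int) (out : Int) : Prop := out = solve_alt n
instance (n : Int) (out : Int) : Decidable (Spec_solve n out) := by unfold Spec_solve; infer_instance

-- ===== CLAIM (what is proved, stated in full; the proofs are below) =====
def Claim_equal_solve : Prop := ∀ (n : Int), Dom_solve n → Spec_solve n (solve n)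

-- ===== LEMMAS AND PROOFS =====

-- closed form of A's loop, multiplied by 9 to stay division-free
lemma loop_closed (m : Nat) (hm : 1 ≤ m) :
    9 * (PySem.List.pyRange 1 (m : Int) 1).foldl
      (fun ans i => ans + i * 9 * 10 ^ (i - 1).toNat) 0
      = 9 * ((m : Int) - 1) * 10 ^ (m - 1) - 10 ^ (m - 1) + 1 := by
  induction m with
  | zero => omega
  | succ k ih =>
    rcases Nat.eq_or_lt_of_le hm with h1 | h1
    · simp [← h1, PySem.List.pyRange_one_eq_nil]
    · have hk : 1 ≤ k := by omega
      have hsplit : PySem.List.pyRange 1 ((k + 1 : Nat) : Int) 1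
          = PySem.List.pyRange 1 (k : Int) 1 ++ [(k : Int)] := by
        have : ((k + 1 : Nat) : Int) = (k : Int) + 1 := by push_cast; ring
        rw [this, PySem.List.pyRange_one_succ_right (by exact_mod_cast hk)]
      rw [hsplit, List.foldl_append]
      simp only [List.foldl_cons, List.foldl_nil]
      have htn : ((k : Int) - 1).toNat = k - 1 := by omega
      rw [mul_add, ih hk, htn]
      have hpow : (10:Int) ^ k = 10 * 10 ^ (k - 1) := by
        conv_lhs => rw [show k = (k - 1) + 1 by omega]
        ring
      simp only [Nat.add_sub_cancel]
      rw [hpow]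
      push_cast
      ring

lemma nine_dvd (m : Nat) : (9 : Int) ∣ 10 ^ m - 1 := by
  induction m with
  | zero => simp
  | succ k ih =>
    have : (10:Int) ^ (k+1) - 1 = 10 * (10 ^ k - 1) + 9 := by ring
    rw [this]
    exact dvd_add (Dvd.dvd.mul_left ih 10) (by norm_num)

lemma b_times_nine (m : Nat) :
    9 * PySem.Int.floordiv (10 ^ m - 1) 9 = 10 ^ m - 1 := by
  rw [PySem.Int.floordiv_eq_ediv_of_pos (by norm_num : (0:Int) < 9)]
  exact Int.mul_ediv_cancel' (nine_dvd m)

-- ===== VERDICT (by name: the statement is the Claim_ definition above) =====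
theorem solve_spec : Claim_equal_solve := by
  intro n _
  unfold Spec_solve solve solve_alt
  by_cases h : n ≤ 9
  · simp [h]
  · simp only [if_neg h]
    set d : Int := PySem.Str.len (PySem.Int.toStr n) with hd
    have hd0 : 0 ≤ d := by
      rw [hd, PySem.Str.len_eq]; positivity
    obtain ⟨m, hm⟩ : ∃ m : Nat, d = (m : Int) := ⟨d.toNat, by omega⟩
    rcases Nat.eq_zero_or_pos m with h0 | h1
    · subst h0
      simp [hm, PySem.List.pyRange_one_eq_nil, PySem.Int.floordiv]
    · have key := loop_closed m h1
      have hb := b_times_nine m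
      have htn : (d - 1).toNat = m - 1 := by omega
      have hdt : d.toNat = m := by omega
      have h9 : (9 : Int) ≠ 0 := by norm_num
      apply mul_left_cancel₀ h9
      rw [hm] at *
      rw [htn, hdt, mul_sub, hb, mul_add, mul_add, key]
      have hpow : (10 : Int) ^ m = 10 * 10 ^ (m - 1) := by
        conv_lhs => rw [show m = (m - 1) + 1 by omega]
        ring
      rw [hpow]
      ring
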